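-- pv_equiv track=rewrite | github.com/ardrotterdam/safetyxacademy | safetyxacademyV2/tools/_nl_site_sweep.py | misc_nl
-- ===== SOURCE A (Python) =====
-- def misc_nl(text: str) -> tuple[str, int]:
--     n = 0
--     pairs = [
--         (
--             "NEBOSH safety training Rotterdam Erasmus Bridge - Featured image for NEBOSH in Rotterdam guide",
--             "NEBOSH opleiding Rotterdam Erasmusbrug — illustratie bij de Rotterdam-gids",
--         ),
--         ("Rotterdam's meest", "Rotterdams meest"),
--         ("Rotterdam's maritieme", "Rotterdams maritieme"),
--     ]
--     for a, b in pairs: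
--         c = text.count(a)
--         if c:
--             text = text.replace(a, b)
--             n += c
--     return text, n
-- ===== SOURCE B (Python) =====
-- def misc_nl(text: str) -> tuple[str, int]:
--     pairs = (
--         (
--             "NEBOSH safety training Rotterdam Erasmus Bridge - Featured image for NEBOSH in Rotterdam guide",
--             "NEBOSH opleiding Rotterdam Erasmusbrug \u2014 illustratie bij de Rotterdam-gids",
--         ),
--         ("Rotterdam's meest", "Rotterdams meest"),
--         ("Rotterdam's maritieme", "Rotterdams maritieme"),
--     )
--     out = []
--     n = 0
--     i = 0
--     L = len(text)
--     while i < L: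
--         for a, b in pairs:
--             if text.startswith(a, i):
--                 out.append(b)
--                 i += len(a)
--                 n += 1
--                 break
--         else:
--             out.append(text[i])
--             i += 1
--     return "".join(out), n
-- ===== Notes on version B (the rewrite author's own statement) =====
-- stated objective: alternative
-- what changed: B replaces A's three sequential count+replace passes over the text with a single left-to-right scan that at each position matches one of the three literal patterns (in A's priority order), emits its replacement and counts it, building the output in one pass; equivalent because the patterns/replacements cannot overlap or create each other.
import Mathlib
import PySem

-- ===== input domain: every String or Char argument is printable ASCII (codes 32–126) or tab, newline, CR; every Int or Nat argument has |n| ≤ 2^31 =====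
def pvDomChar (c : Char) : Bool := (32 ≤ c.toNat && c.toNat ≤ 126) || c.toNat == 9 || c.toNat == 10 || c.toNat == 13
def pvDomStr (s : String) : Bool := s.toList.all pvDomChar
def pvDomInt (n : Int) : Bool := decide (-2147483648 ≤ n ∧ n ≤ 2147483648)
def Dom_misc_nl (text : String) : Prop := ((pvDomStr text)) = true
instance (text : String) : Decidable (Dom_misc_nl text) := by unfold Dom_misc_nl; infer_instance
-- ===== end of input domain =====

-- B replaces A's three sequential count+replace passes with a single left-to-right scan that
-- matches the three literal patterns in priority order and counts as it substitutes (objective: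
-- alternative one-pass algorithm; same return value).

-- ===== PORT A =====
def misc_nl (text : String) : String × Int :=
  let pairs : List (String × String) :=
    [("NEBOSH safety training Rotterdam Erasmus Bridge - Featured image for NEBOSH in Rotterdam guide",
      "NEBOSH opleiding Rotterdam Erasmusbrug — illustratie bij de Rotterdam-gids"),
     ("Rotterdam's meest", "Rotterdams meest"),
     ("Rotterdam's maritieme", "Rotterdams maritieme")]
  pairs.foldl (fun (st : String × Int) (ab : String × String) =>
    let c := PySem.Str.count st.1 ab.1
    if c ≠ 0 then (PySem.Str.replace st.1 ab.1 ab.2, st.2 + (c : Int)) else st)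
    (text, 0)

-- ===== PORT B =====
def pvB_P1 : List Char :=
  "NEBOSH safety training Rotterdam Erasmus Bridge - Featured image for NEBOSH in Rotterdam guide".toList
def pvB_R1 : List Char :=
  "NEBOSH opleiding Rotterdam Erasmusbrug — illustratie bij de Rotterdam-gids".toList
def pvB_P2 : List Char := "Rotterdam's meest".toList
def pvB_R2 : List Char := "Rotterdams meest".toList
def pvB_P3 : List Char := "Rotterdam's maritieme".toList
def pvB_R3 : List Char := "Rotterdams maritieme".toList

def pvB_pairs : List (List Char × List Char) :=
  [(pvB_P1, pvB_R1), (pvB_P2, pvB_R2), (pvB_P3, pvB_R3)]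

-- the inner 'for a, b in pairs: if text.startswith(a, i): … break / else:' of B
def pvB_try (cs : List Char) : List (List Char × List Char) → Option (List Char × Nat)
  | [] => none
  | (a, b) :: rest => if PySem.Chars.startswith cs a then some (b, a.length) else pvB_try cs rest

-- the 'while i < L' scan of B, recursing on the remaining suffix
def pvB_scan (pairs : List (List Char × List Char)) (cs : List Char) : List Char × Int :=
  match cs with
  | [] => ([], 0)
  | c :: t =>
    match pvB_try (c :: t) pairs with
    | some (b, la) =>
      let r := pvB_scan pairs (t.drop (la - 1))
      (b ++ r.1, r.2 + 1)
    | none =>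
      let r := pvB_scan pairs t
      (c :: r.1, r.2)
termination_by cs.length
decreasing_by all_goals (simp [List.length_drop]; try omega)

def misc_nl_alt (text : String) : String × Int :=
  let r := pvB_scan pvB_pairs text.toList
  (String.ofList r.1, r.2)

-- ===== PRECONDITION & SPEC =====
def Spec_misc_nl (text : String) (out : String × Int) : Prop := out = misc_nl_alt text
instance (text : String) (out : String × Int) : Decidable (Spec_misc_nl text out) := by unfold Spec_misc_nl; infer_instance

-- ===== CLAIM (what is proved, stated in full; the proofs are below) =====
def Claim_equal_misc_nl : Prop := ∀ (text : String), Dom_misc_nl text → Spec_misc_nl text (misc_nl text)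

-- ===== LEMMAS AND PROOFS =====

-- fuel-free restatement of PySem.Chars.replace / count (for non-empty pattern)
def pvRep (p r : List Char) (l : List Char) : List Char :=
  match l with
  | [] => []
  | c :: t =>
    if p.isPrefixOf (c :: t) then r ++ pvRep p r (t.drop (p.length - 1)) else c :: pvRep p r t
termination_by l.length
decreasing_by all_goals (simp [List.length_drop]; try omega)

def pvCnt (p : List Char) (l : List Char) : Nat :=
  match l with
  | [] => 0
  | c :: t =>
    if p.isPrefixOf (c :: t) then 1 + pvCnt p (t.drop (p.length - 1)) else pvCnt p t
termination_by l.length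
decreasing_by all_goals (simp [List.length_drop]; try omega)

-- "the first min(|a|,|b|) characters of a and b agree"
def pvCompat : List Char → List Char → Bool
  | [], _ => true
  | _, [] => true
  | a :: q, c :: s => a == c && pvCompat q s

theorem pvRep_cons (p r : List Char) (c : Char) (t : List Char)
    (h : p.isPrefixOf (c :: t) = false) : pvRep p r (c :: t) = c :: pvRep p r t := by
  rw [pvRep]; simp [h]

theorem pvCnt_cons (p : List Char) (c : Char) (t : List Char)
    (h : p.isPrefixOf (c :: t) = false) : pvCnt p (c :: t) = pvCnt p t := by
  rw [pvCnt]; simp [h]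

theorem pvRep_go (p r : List Char) (hp : p ≠ []) :
    ∀ (fuel : Nat) (l acc : List Char), l.length ≤ fuel →
      PySem.Chars.replace.go p r fuel l acc = acc.reverse ++ pvRep p r l := by
  intro fuel
  induction fuel with
  | zero =>
    intro l acc hl
    have : l = [] := List.eq_nil_of_length_eq_zero (Nat.le_zero.mp hl)
    subst this
    simp [PySem.Chars.replace.go, pvRep]
  | succ fuel ih =>
    intro l acc hl
    cases l with
    | nil => simp [PySem.Chars.replace.go, pvRep]
    | cons c t =>
      have hp1 : 1 ≤ p.length := List.length_pos_of_ne_nil hp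
      rw [PySem.Chars.replace.go]
      by_cases hpre : p.isPrefixOf (c :: t) = true
      · rw [if_pos hpre]
        have hdl : (List.drop p.length (c :: t)).length ≤ fuel := by
          simp only [List.length_drop, List.length_cons]
          simp only [List.length_cons] at hl
          omega
        rw [ih _ _ hdl]
        have hrep : pvRep p r (c :: t) = r ++ pvRep p r (t.drop (p.length - 1)) := by
          rw [pvRep]; simp [hpre]
        have hdrop : List.drop p.length (c :: t) = t.drop (p.length - 1) := by
          obtain ⟨k, hk⟩ : ∃ k, p.length = k + 1 := ⟨p.length - 1, by omega⟩
          rw [hk]; simp [List.drop_succ_cons]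
        rw [hdrop, hrep, List.reverse_append, List.reverse_reverse, List.append_assoc]
      · rw [if_neg hpre]
        have ht : t.length ≤ fuel := by simp only [List.length_cons] at hl; omega
        rw [ih _ _ ht, pvRep_cons p r c t (Bool.not_eq_true _ ▸ eq_false_of_ne_true hpre)]
        simp

theorem pvCnt_go (p : List Char) (hp : p ≠ []) :
    ∀ (fuel : Nat) (l : List Char) (acc : Nat), l.length ≤ fuel →
      PySem.Chars.count.go p fuel l acc = acc + pvCnt p l := by
  intro fuel
  induction fuel with
  | zero =>
    intro l acc hl
    have : l = [] := List.eq_nil_of_length_eq_zero (Nat.le_zero.mp hl)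
    subst this
    simp [PySem.Chars.count.go, pvCnt]
  | succ fuel ih =>
    intro l acc hl
    cases l with
    | nil => simp [PySem.Chars.count.go, pvCnt]
    | cons c t =>
      have hp1 : 1 ≤ p.length := List.length_pos_of_ne_nil hp
      rw [PySem.Chars.count.go]
      by_cases hpre : p.isPrefixOf (c :: t) = true
      · rw [if_pos hpre]
        have hdl : (List.drop p.length (c :: t)).length ≤ fuel := by
          simp only [List.length_drop, List.length_cons]
          simp only [List.length_cons] at hl
          omega
        rw [ih _ _ hdl]
        have hcnt : pvCnt p (c :: t) = 1 + pvCnt p (t.drop (p.length - 1)) := by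
          rw [pvCnt]; simp [hpre]
        have hdrop : List.drop p.length (c :: t) = t.drop (p.length - 1) := by
          obtain ⟨k, hk⟩ : ∃ k, p.length = k + 1 := ⟨p.length - 1, by omega⟩
          rw [hk]; simp [List.drop_succ_cons]
        rw [hdrop, hcnt]; omega
      · rw [if_neg hpre]
        have ht : t.length ≤ fuel := by simp only [List.length_cons] at hl; omega
        rw [ih _ _ ht, pvCnt_cons p c t (Bool.not_eq_true _ ▸ eq_false_of_ne_true hpre)]

theorem pvReplace_eq (p r l : List Char) (hp : p ≠ []) :
    PySem.Chars.replace l p r = pvRep p r l := by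
  rw [PySem.Chars.replace]
  rw [if_neg (by simpa [List.isEmpty_iff] using hp)]
  simpa using pvRep_go p r hp l.length l [] le_rfl

theorem pvCount_eq (p l : List Char) (hp : p ≠ []) :
    PySem.Chars.count l p = pvCnt p l := by
  rw [PySem.Chars.count]
  rw [if_neg (by simpa [List.isEmpty_iff] using hp)]
  simpa using pvCnt_go p hp l.length l 0 le_rfl

theorem pvRep_of_cnt_zero (p r l : List Char) (h : pvCnt p l = 0) : pvRep p r l = l := by
  have H : ∀ (n : Nat) (l : List Char), l.length ≤ n → pvCnt p l = 0 → pvRep p r l = l := by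
    intro n
    induction n with
    | zero =>
      intro l hl _
      have : l = [] := List.eq_nil_of_length_eq_zero (Nat.le_zero.mp hl)
      subst this; rw [pvRep]
    | succ n ih =>
      intro l hl h0
      cases l with
      | nil => rw [pvRep]
      | cons c t =>
        by_cases hpre : p.isPrefixOf (c :: t) = true
        · rw [pvCnt, if_pos hpre] at h0; omega
        · have hpre' : p.isPrefixOf (c :: t) = false := eq_false_of_ne_true hpre
          rw [pvCnt_cons p c t hpre'] at h0
          rw [pvRep_cons p r c t hpre',
            ih t (by simp only [List.length_cons] at hl; omega) h0]
  exact H l.length l le_rfl h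

-- a match at the head
theorem pvRep_head (p r x : List Char) (hp : p ≠ []) :
    pvRep p r (p ++ x) = r ++ pvRep p r x := by
  rcases p with _ | ⟨a, q⟩
  · exact absurd rfl hp
  · rw [List.cons_append, pvRep]
    have hpre : (a :: q).isPrefixOf (a :: (q ++ x)) = true := by
      rw [List.isPrefixOf_iff_prefix]; exact ⟨x, by simp⟩
    simp [hpre]

theorem pvCnt_head (p x : List Char) (hp : p ≠ []) :
    pvCnt p (p ++ x) = 1 + pvCnt p x := by
  rcases p with _ | ⟨a, q⟩
  · exact absurd rfl hp
  · rw [List.cons_append, pvCnt]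
    have hpre : (a :: q).isPrefixOf (a :: (q ++ x)) = true := by
      rw [List.isPrefixOf_iff_prefix]; exact ⟨x, by simp⟩
    simp [hpre]

-- no match at the head
-- compat basics
theorem pvCompat_of_append (q r y : List Char) (h : pvCompat q (r ++ y) = true) :
    pvCompat q r = true := by
  induction r generalizing q with
  | nil => cases q <;> simp [pvCompat]
  | cons c r' ih =>
    cases q with
    | nil => simp [pvCompat]
    | cons a q' =>
      simp only [List.cons_append, pvCompat, Bool.and_eq_true] at h ⊢
      exact ⟨h.1, ih q' h.2⟩

theorem pvCompat_of_isPrefixOf (q u x : List Char) (h : q.isPrefixOf (u ++ x) = true) :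
    pvCompat q u = true := by
  induction u generalizing q with
  | nil => cases q <;> simp [pvCompat]
  | cons c u' ih =>
    cases q with
    | nil => simp [pvCompat]
    | cons a q' =>
      simp only [List.cons_append, List.isPrefixOf, Bool.and_eq_true] at h
      simp only [pvCompat, Bool.and_eq_true]
      exact ⟨h.1, ih q' h.2⟩

theorem pvIsPrefixOf_of_compat (q l : List Char) (h : pvCompat q l = true)
    (hlen : q.length ≤ l.length) : q.isPrefixOf l = true := by
  induction q generalizing l with
  | nil => simp [List.isPrefixOf]
  | cons a q' ih =>
    cases l with
    | nil => simp at hlen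
    | cons c t =>
      simp only [pvCompat, Bool.and_eq_true] at h
      simp only [List.isPrefixOf, Bool.and_eq_true]
      exact ⟨h.1, ih t h.2 (by simpa using hlen)⟩

theorem pvCompat_strict (q l : List Char) (h : pvCompat q l = true)
    (hlen : l.length < q.length) : l = q.take l.length := by
  induction l generalizing q with
  | nil => simp
  | cons c t ih =>
    cases q with
    | nil => simp at hlen
    | cons a q' =>
      simp only [pvCompat, Bool.and_eq_true, beq_iff_eq] at h
      have ht := ih q' h.2 (by simpa using hlen)
      simp only [List.length_cons, List.take_succ_cons, h.1, ← ht]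

theorem pvNotPrefix_of_notCompat (q l : List Char) (h : pvCompat q l = false) :
    q.isPrefixOf l = false := by
  by_contra hne
  have h1 : q.isPrefixOf l = true := by
    cases hq : q.isPrefixOf l with
    | false => exact absurd hq hne
    | true => rfl
  have h2 := pvCompat_of_isPrefixOf q l [] (by simpa using h1)
  rw [h2] at h
  simp at h

-- barrier: a block u in which no p-occurrence can start passes through pvRep/pvCnt unchanged
theorem pvRep_barrier (p r u : List Char)
    (hu : ∀ s ∈ u.tails, s ≠ [] → pvCompat p s = false) :
    ∀ x, pvRep p r (u ++ x) = u ++ pvRep p r x := by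
  induction u with
  | nil => simp
  | cons c u' ih =>
    intro x
    have hmem : (c :: u') ∈ (c :: u').tails := (List.mem_tails _ _).mpr (List.suffix_refl _)
    have hc := hu (c :: u') hmem (by simp)
    have hpre : p.isPrefixOf ((c :: u') ++ x) = false := by
      cases hq : p.isPrefixOf ((c :: u') ++ x) with
      | false => rfl
      | true =>
        have := pvCompat_of_isPrefixOf p (c :: u') x (by simpa using hq)
        rw [this] at hc; simp at hc
    rw [List.cons_append] at hpre ⊢
    rw [pvRep_cons p r c (u' ++ x) hpre]
    rw [ih (fun s hs hne => hu s (by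
      rw [List.mem_tails _ _] at hs ⊢
      exact hs.trans (List.suffix_cons c u')) hne) x]
    rw [List.cons_append]

theorem pvCnt_barrier (p u : List Char)
    (hu : ∀ s ∈ u.tails, s ≠ [] → pvCompat p s = false) :
    ∀ x, pvCnt p (u ++ x) = pvCnt p x := by
  induction u with
  | nil => simp
  | cons c u' ih =>
    intro x
    have hmem : (c :: u') ∈ (c :: u').tails := (List.mem_tails _ _).mpr (List.suffix_refl _)
    have hc := hu (c :: u') hmem (by simp)
    have hpre : p.isPrefixOf ((c :: u') ++ x) = false := by
      cases hq : p.isPrefixOf ((c :: u') ++ x) with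
      | false => rfl
      | true =>
        have := pvCompat_of_isPrefixOf p (c :: u') x (by simpa using hq)
        rw [this] at hc; simp at hc
    rw [List.cons_append] at hpre ⊢
    rw [pvCnt_cons p c (u' ++ x) hpre]
    rw [ih (fun s hs hne => hu s (by
      rw [List.mem_tails _ _] at hs ⊢
      exact hs.trans (List.suffix_cons c u')) hne) x]

-- replacing p by r cannot create a new (partial) occurrence of q when no suffix of q is compatible with r
theorem pvCompat_preserve (p r q : List Char)
    (hq : ∀ s ∈ q.tails, s ≠ [] → pvCompat s r = false) :
    ∀ (n : Nat) (l s : List Char), l.length ≤ n → s ∈ q.tails → pvCompat s l = false →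
      pvCompat s (pvRep p r l) = false := by
  intro n
  induction n with
  | zero =>
    intro l s hl hs hcompat
    have : l = [] := List.eq_nil_of_length_eq_zero (Nat.le_zero.mp hl)
    subst this
    cases s <;> simp [pvCompat] at hcompat
  | succ n ih =>
    intro l s hl hs hcompat
    cases l with
    | nil => cases s <;> simp [pvCompat] at hcompat
    | cons c t =>
      have hsne : s ≠ [] := by
        intro hh; subst hh; simp [pvCompat] at hcompat
      by_cases hpre : p.isPrefixOf (c :: t) = true
      · have hrep : pvRep p r (c :: t) = r ++ pvRep p r (t.drop (p.length - 1)) := by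
          rw [pvRep]; simp [hpre]
        rw [hrep]
        cases hSR : pvCompat s (r ++ pvRep p r (t.drop (p.length - 1))) with
        | false => rfl
        | true =>
          have := pvCompat_of_append s r _ hSR
          rw [hq s hs hsne] at this; simp at this
      · have hpre' : p.isPrefixOf (c :: t) = false := eq_false_of_ne_true hpre
        rw [pvRep_cons p r c t hpre']
        cases s with
        | nil => exact absurd rfl hsne
        | cons a s' =>
          simp only [pvCompat, Bool.and_eq_false_iff] at hcompat ⊢
          rcases hcompat with hac | hst
          · exact Or.inl hac
          · refine Or.inr (ih t s' ?_ ?_ hst)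
            · simp only [List.length_cons] at hl; omega
            · rw [List.mem_tails _ _] at hs ⊢
              exact (List.suffix_cons a s').trans hs

-- a string too short to contain any occurrence
theorem pvRep_short (p r l : List Char) (h : l.length < p.length) : pvRep p r l = l := by
  have H : ∀ (n : Nat) (l : List Char), l.length ≤ n → l.length < p.length → pvRep p r l = l := by
    intro n
    induction n with
    | zero =>
      intro l hl _
      have : l = [] := List.eq_nil_of_length_eq_zero (Nat.le_zero.mp hl)
      subst this; rw [pvRep]
    | succ n ih =>
      intro l hl hsh
      cases l with
      | nil => rw [pvRep]
      | cons c t =>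
        have hpre : p.isPrefixOf (c :: t) = false := by
          cases hq : p.isPrefixOf (c :: t) with
          | false => rfl
          | true =>
            have := (List.isPrefixOf_iff_prefix.mp hq).length_le
            omega
        rw [pvRep_cons p r c t hpre]
        rw [ih t (by simp only [List.length_cons] at hl; omega)
          (by simp only [List.length_cons] at hsh ⊢; omega)]
  exact H l.length l le_rfl h

theorem pvCnt_short (p l : List Char) (h : l.length < p.length) : pvCnt p l = 0 := by
  have H : ∀ (n : Nat) (l : List Char), l.length ≤ n → l.length < p.length → pvCnt p l = 0 := by
    intro n
    induction n with
    | zero =>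
      intro l hl _
      have : l = [] := List.eq_nil_of_length_eq_zero (Nat.le_zero.mp hl)
      subst this; rw [pvCnt]
    | succ n ih =>
      intro l hl hsh
      cases l with
      | nil => rw [pvCnt]
      | cons c t =>
        have hpre : p.isPrefixOf (c :: t) = false := by
          cases hq : p.isPrefixOf (c :: t) with
          | false => rfl
          | true =>
            have := (List.isPrefixOf_iff_prefix.mp hq).length_le
            omega
        rw [pvCnt_cons p c t hpre]
        exact ih t (by simp only [List.length_cons] at hl; omega)
          (by simp only [List.length_cons] at hsh ⊢; omega)
  exact H l.length l le_rfl h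

-- scan step lemmas
theorem pvB_scan_match (pairs : List (List Char × List Char)) (p b x : List Char)
    (hp : p ≠ []) (htry : pvB_try (p ++ x) pairs = some (b, p.length)) :
    pvB_scan pairs (p ++ x) =
      (b ++ (pvB_scan pairs x).1, (pvB_scan pairs x).2 + 1) := by
  rcases p with _ | ⟨a, q⟩
  · exact absurd rfl hp
  · rw [List.cons_append] at htry ⊢
    rw [pvB_scan, htry]
    simp

theorem pvB_scan_cons (pairs : List (List Char × List Char)) (c : Char) (t : List Char)
    (htry : pvB_try (c :: t) pairs = none) :
    pvB_scan pairs (c :: t) = (c :: (pvB_scan pairs t).1, (pvB_scan pairs t).2) := by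
  rw [pvB_scan, htry]

theorem pvB_scan_nomatch (pairs : List (List Char × List Char)) :
    ∀ l, (∀ s ∈ l.tails, s ≠ [] → pvB_try s pairs = none) → pvB_scan pairs l = (l, 0) := by
  intro l
  induction l with
  | nil => intro _; rw [pvB_scan]
  | cons c t ih =>
    intro h
    have hmem : (c :: t) ∈ (c :: t).tails := (List.mem_tails _ _).mpr (List.suffix_refl _)
    rw [pvB_scan_cons pairs c t (h (c :: t) hmem (by simp))]
    rw [ih (fun s hs hne => h s (by
      rw [List.mem_tails _ _] at hs ⊢
      exact hs.trans (List.suffix_cons c t)) hne)]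

-- no occurrence of p anywhere in l
theorem pvRep_noocc (p r l : List Char) (h : ∀ s ∈ l.tails, p.isPrefixOf s = false) :
    pvRep p r l = l := by
  induction l with
  | nil => rw [pvRep]
  | cons c t ih =>
    have hmem : (c :: t) ∈ (c :: t).tails := (List.mem_tails _ _).mpr (List.suffix_refl _)
    rw [pvRep_cons p r c t (h (c :: t) hmem)]
    rw [ih (fun s hs => h s (by
      rw [List.mem_tails _ _] at hs ⊢
      exact hs.trans (List.suffix_cons c t)))]

theorem pvCnt_noocc (p l : List Char) (h : ∀ s ∈ l.tails, p.isPrefixOf s = false) :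
    pvCnt p l = 0 := by
  induction l with
  | nil => rw [pvCnt]
  | cons c t ih =>
    have hmem : (c :: t) ∈ (c :: t).tails := (List.mem_tails _ _).mpr (List.suffix_refl _)
    rw [pvCnt_cons p c t (h (c :: t) hmem)]
    exact ih (fun s hs => h s (by
      rw [List.mem_tails _ _] at hs ⊢
      exact hs.trans (List.suffix_cons c t)))

theorem pvPrefix_false_of_short (p l : List Char) (h : l.length < p.length) :
    p.isPrefixOf l = false := by
  cases hq : p.isPrefixOf l with
  | false => rfl
  | true =>
    have := (List.isPrefixOf_iff_prefix.mp hq).length_le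
    omega

-- evaluating the inner pair loop of B
theorem pvTry1 (s : List Char) (h1 : pvB_P1.isPrefixOf s = true) :
    pvB_try s pvB_pairs = some (pvB_R1, pvB_P1.length) := by
  simp [pvB_try, pvB_pairs, PySem.Chars.startswith, h1]

theorem pvTry2 (s : List Char) (h1 : pvB_P1.isPrefixOf s = false)
    (h2 : pvB_P2.isPrefixOf s = true) :
    pvB_try s pvB_pairs = some (pvB_R2, pvB_P2.length) := by
  simp [pvB_try, pvB_pairs, PySem.Chars.startswith, h1, h2]

theorem pvTry3 (s : List Char) (h1 : pvB_P1.isPrefixOf s = false)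
    (h2 : pvB_P2.isPrefixOf s = false) (h3 : pvB_P3.isPrefixOf s = true) :
    pvB_try s pvB_pairs = some (pvB_R3, pvB_P3.length) := by
  simp [pvB_try, pvB_pairs, PySem.Chars.startswith, h1, h2, h3]

theorem pvTryNone (s : List Char) (h1 : pvB_P1.isPrefixOf s = false)
    (h2 : pvB_P2.isPrefixOf s = false) (h3 : pvB_P3.isPrefixOf s = false) :
    pvB_try s pvB_pairs = none := by
  simp [pvB_try, pvB_pairs, PySem.Chars.startswith, h1, h2, h3]

-- decidable facts about the literal patterns and replacements
theorem pvNe1 : pvB_P1 ≠ [] := by decide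
theorem pvNe2 : pvB_P2 ≠ [] := by decide
theorem pvNe3 : pvB_P3 ≠ [] := by decide
theorem pvLen1 : pvB_P1.length = 94 := by decide
theorem pvLen2 : pvB_P2.length = 17 := by decide
theorem pvLen3 : pvB_P3.length = 21 := by decide
theorem pvHb_P2_R1 : ∀ s ∈ pvB_R1.tails, s ≠ [] → pvCompat pvB_P2 s = false := by decide
theorem pvHb_P3_R1 : ∀ s ∈ pvB_R1.tails, s ≠ [] → pvCompat pvB_P3 s = false := by decide
theorem pvHb_P1_P2 : ∀ s ∈ pvB_P2.tails, s ≠ [] → pvCompat pvB_P1 s = false := by decide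
theorem pvHb_P1_P3 : ∀ s ∈ pvB_P3.tails, s ≠ [] → pvCompat pvB_P1 s = false := by decide
theorem pvHb_P2_P3 : ∀ s ∈ pvB_P3.tails, s ≠ [] → pvCompat pvB_P2 s = false := by decide
theorem pvHb_P3_R2 : ∀ s ∈ pvB_R2.tails, s ≠ [] → pvCompat pvB_P3 s = false := by decide
theorem pvHq_P2_R1 : ∀ s ∈ pvB_P2.tails, s ≠ [] → pvCompat s pvB_R1 = false := by decide
theorem pvHq_P3_R1 : ∀ s ∈ pvB_P3.tails, s ≠ [] → pvCompat s pvB_R1 = false := by decide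
theorem pvHq_P3_R2 : ∀ s ∈ pvB_P3.tails, s ≠ [] → pvCompat s pvB_R2 = false := by decide

-- the main invariant: the one-pass scan computes the three sequential passes and the count sum
theorem pvMain : ∀ (n : Nat) (l : List Char), l.length ≤ n →
    pvB_scan pvB_pairs l =
      (pvRep pvB_P3 pvB_R3 (pvRep pvB_P2 pvB_R2 (pvRep pvB_P1 pvB_R1 l)),
       ((pvCnt pvB_P1 l + pvCnt pvB_P2 (pvRep pvB_P1 pvB_R1 l)
         + pvCnt pvB_P3 (pvRep pvB_P2 pvB_R2 (pvRep pvB_P1 pvB_R1 l)) : Nat) : Int)) := by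
  intro n
  induction n with
  | zero =>
    intro l hl
    have : l = [] := List.eq_nil_of_length_eq_zero (Nat.le_zero.mp hl)
    subst this
    simp [pvB_scan, pvRep, pvCnt]
  | succ n ih =>
    intro l hl
    cases l with
    | nil => simp [pvB_scan, pvRep, pvCnt]
    | cons c t =>
      simp only [List.length_cons] at hl
      by_cases h1 : pvB_P1.isPrefixOf (c :: t) = true
      · obtain ⟨l', hl'⟩ := List.isPrefixOf_iff_prefix.mp h1
        rw [← hl']
        have hlen' : l'.length ≤ n := by
          have hc : (pvB_P1 ++ l').length = (c :: t).length := by rw [hl']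
          have h94 := pvLen1
          simp only [List.length_append, List.length_cons] at hc
          omega
        have htry : pvB_try (pvB_P1 ++ l') pvB_pairs = some (pvB_R1, pvB_P1.length) :=
          pvTry1 _ (by rw [hl']; exact h1)
        rw [pvB_scan_match pvB_pairs pvB_P1 pvB_R1 l' pvNe1 htry]
        rw [ih l' hlen']
        rw [pvRep_head _ _ _ pvNe1]
        rw [pvRep_barrier _ _ _ pvHb_P2_R1]
        rw [pvRep_barrier _ _ _ pvHb_P3_R1]
        rw [pvCnt_head _ _ pvNe1]
        rw [pvCnt_barrier _ _ pvHb_P2_R1]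
        rw [pvCnt_barrier _ _ pvHb_P3_R1]
        simp only [Prod.mk.injEq]
        exact ⟨trivial, by push_cast; ring⟩
      · have h1' : pvB_P1.isPrefixOf (c :: t) = false := eq_false_of_ne_true h1
        by_cases h2 : pvB_P2.isPrefixOf (c :: t) = true
        · obtain ⟨l', hl'⟩ := List.isPrefixOf_iff_prefix.mp h2
          rw [← hl']
          have hlen' : l'.length ≤ n := by
            have hc : (pvB_P2 ++ l').length = (c :: t).length := by rw [hl']
            have h17 := pvLen2
            simp only [List.length_append, List.length_cons] at hc
            omega
          have htry : pvB_try (pvB_P2 ++ l') pvB_pairs = some (pvB_R2, pvB_P2.length) :=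
            pvTry2 _ (by rw [hl']; exact h1') (by rw [hl']; exact h2)
          rw [pvB_scan_match pvB_pairs pvB_P2 pvB_R2 l' pvNe2 htry]
          rw [ih l' hlen']
          rw [pvRep_barrier _ _ _ pvHb_P1_P2]
          rw [pvRep_head _ _ _ pvNe2]
          rw [pvRep_barrier _ _ _ pvHb_P3_R2]
          rw [pvCnt_barrier _ _ pvHb_P1_P2]
          rw [pvCnt_head _ _ pvNe2]
          rw [pvCnt_barrier _ _ pvHb_P3_R2]
          simp only [Prod.mk.injEq]
          exact ⟨trivial, by push_cast; ring⟩
        · have h2' : pvB_P2.isPrefixOf (c :: t) = false := eq_false_of_ne_true h2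
          by_cases h3 : pvB_P3.isPrefixOf (c :: t) = true
          · obtain ⟨l', hl'⟩ := List.isPrefixOf_iff_prefix.mp h3
            rw [← hl']
            have hlen' : l'.length ≤ n := by
              have hc : (pvB_P3 ++ l').length = (c :: t).length := by rw [hl']
              have h21 := pvLen3
              simp only [List.length_append, List.length_cons] at hc
              omega
            have htry : pvB_try (pvB_P3 ++ l') pvB_pairs = some (pvB_R3, pvB_P3.length) :=
              pvTry3 _ (by rw [hl']; exact h1') (by rw [hl']; exact h2') (by rw [hl']; exact h3)
            rw [pvB_scan_match pvB_pairs pvB_P3 pvB_R3 l' pvNe3 htry]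
            rw [ih l' hlen']
            rw [pvRep_barrier _ _ _ pvHb_P1_P3]
            rw [pvRep_barrier _ _ _ pvHb_P2_P3]
            rw [pvRep_head _ _ _ pvNe3]
            rw [pvCnt_barrier _ _ pvHb_P1_P3]
            rw [pvCnt_barrier _ _ pvHb_P2_P3]
            rw [pvCnt_head _ _ pvNe3]
            simp only [Prod.mk.injEq]
            exact ⟨trivial, by push_cast; ring⟩
          · have h3' : pvB_P3.isPrefixOf (c :: t) = false := eq_false_of_ne_true h3
            by_cases hshort : (c :: t).length < 17
            · have e1 := pvRep_short pvB_P1 pvB_R1 (c :: t) (by rw [pvLen1]; omega)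
              have f1 := pvCnt_short pvB_P1 (c :: t) (by rw [pvLen1]; omega)
              have e2 := pvRep_short pvB_P2 pvB_R2 (c :: t) (by rw [pvLen2]; omega)
              have f2 := pvCnt_short pvB_P2 (c :: t) (by rw [pvLen2]; omega)
              have e3 := pvRep_short pvB_P3 pvB_R3 (c :: t) (by rw [pvLen3]; omega)
              have f3 := pvCnt_short pvB_P3 (c :: t) (by rw [pvLen3]; omega)
              have hscan : pvB_scan pvB_pairs (c :: t) = (c :: t, 0) := by
                apply pvB_scan_nomatch
                intro s hs hne
                have hsl : s.length ≤ (c :: t).length :=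
                  ((List.mem_tails _ _).mp hs).length_le
                exact pvTryNone s
                  (pvPrefix_false_of_short _ _ (by rw [pvLen1]; omega))
                  (pvPrefix_false_of_short _ _ (by rw [pvLen2]; omega))
                  (pvPrefix_false_of_short _ _ (by rw [pvLen3]; omega))
              rw [hscan, e1, e2, e3, f1, f2, f3]
              simp
            · rw [not_lt] at hshort
              have hc2 : pvCompat pvB_P2 (c :: t) = false := by
                cases hq : pvCompat pvB_P2 (c :: t) with
                | false => rfl
                | true =>
                  have := pvIsPrefixOf_of_compat _ _ hq (by rw [pvLen2]; simpa using hshort)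
                  rw [this] at h2'; simp at h2'
              by_cases hc3 : pvCompat pvB_P3 (c :: t) = true
              · have hlt : (c :: t).length < pvB_P3.length := by
                  by_contra hge
                  have := pvIsPrefixOf_of_compat _ _ hc3 (by omega)
                  rw [this] at h3'; simp at h3'
                have hTake := pvCompat_strict _ _ hc3 hlt
                rw [pvLen3] at hlt
                have hk : (c :: t).length = 17 ∨ (c :: t).length = 18 ∨
                    (c :: t).length = 19 ∨ (c :: t).length = 20 := by
                  simp only [List.length_cons] at hlt hshort ⊢; omega
                rcases hk with hk | hk | hk | hk <;> rw [hk] at hTake <;> rw [hTake] <;>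
                  rw [pvB_scan_nomatch _ _ (by decide),
                    pvRep_short pvB_P1 pvB_R1 _ (by decide),
                    pvCnt_short pvB_P1 _ (by decide),
                    pvRep_noocc pvB_P2 pvB_R2 _ (by decide),
                    pvCnt_noocc pvB_P2 _ (by decide),
                    pvRep_noocc pvB_P3 pvB_R3 _ (by decide),
                    pvCnt_noocc pvB_P3 _ (by decide)] <;>
                  simp
              · have hc3' : pvCompat pvB_P3 (c :: t) = false := eq_false_of_ne_true hc3
                have hmem2 : pvB_P2 ∈ pvB_P2.tails := (List.mem_tails _ _).mpr (List.suffix_refl _)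
                have hmem3 : pvB_P3 ∈ pvB_P3.tails := (List.mem_tails _ _).mpr (List.suffix_refl _)
                have hF : pvRep pvB_P1 pvB_R1 (c :: t) = c :: pvRep pvB_P1 pvB_R1 t :=
                  pvRep_cons _ _ _ _ h1'
                have hP2F : pvB_P2.isPrefixOf (pvRep pvB_P1 pvB_R1 (c :: t)) = false :=
                  pvNotPrefix_of_notCompat _ _
                    (pvCompat_preserve pvB_P1 pvB_R1 pvB_P2 pvHq_P2_R1 (c :: t).length
                      (c :: t) pvB_P2 le_rfl hmem2 hc2)
                have hcomp3F : pvCompat pvB_P3 (pvRep pvB_P1 pvB_R1 (c :: t)) = false :=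
                  pvCompat_preserve pvB_P1 pvB_R1 pvB_P3 pvHq_P3_R1 (c :: t).length
                    (c :: t) pvB_P3 le_rfl hmem3 hc3'
                have hP3G : pvB_P3.isPrefixOf
                    (pvRep pvB_P2 pvB_R2 (pvRep pvB_P1 pvB_R1 (c :: t))) = false :=
                  pvNotPrefix_of_notCompat _ _
                    (pvCompat_preserve pvB_P2 pvB_R2 pvB_P3 pvHq_P3_R2
                      (pvRep pvB_P1 pvB_R1 (c :: t)).length
                      (pvRep pvB_P1 pvB_R1 (c :: t)) pvB_P3 le_rfl hmem3 hcomp3F)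
                have hG : pvRep pvB_P2 pvB_R2 (pvRep pvB_P1 pvB_R1 (c :: t)) =
                    c :: pvRep pvB_P2 pvB_R2 (pvRep pvB_P1 pvB_R1 t) := by
                  rw [hF] at hP2F ⊢
                  exact pvRep_cons _ _ _ _ hP2F
                have hH : pvRep pvB_P3 pvB_R3
                    (pvRep pvB_P2 pvB_R2 (pvRep pvB_P1 pvB_R1 (c :: t))) =
                    c :: pvRep pvB_P3 pvB_R3 (pvRep pvB_P2 pvB_R2 (pvRep pvB_P1 pvB_R1 t)) := by
                  rw [hG] at hP3G ⊢
                  exact pvRep_cons _ _ _ _ hP3G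
                have hcnt1 : pvCnt pvB_P1 (c :: t) = pvCnt pvB_P1 t := pvCnt_cons _ _ _ h1'
                have hcnt2 : pvCnt pvB_P2 (pvRep pvB_P1 pvB_R1 (c :: t)) =
                    pvCnt pvB_P2 (pvRep pvB_P1 pvB_R1 t) := by
                  rw [hF] at hP2F ⊢
                  exact pvCnt_cons _ _ _ hP2F
                have hcnt3 : pvCnt pvB_P3
                    (pvRep pvB_P2 pvB_R2 (pvRep pvB_P1 pvB_R1 (c :: t))) =
                    pvCnt pvB_P3 (pvRep pvB_P2 pvB_R2 (pvRep pvB_P1 pvB_R1 t)) := by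
                  rw [hG] at hP3G ⊢
                  exact pvCnt_cons _ _ _ hP3G
                rw [pvB_scan_cons pvB_pairs c t (pvTryNone _ h1' h2' h3')]
                rw [ih t (by omega)]
                rw [hH, hcnt1, hcnt2, hcnt3]

-- the fold step of A always performs the replacement and adds the count
theorem pvFoldStep (st : String × Int) (ps rs : String) (hp : ps.toList ≠ []) :
    (if PySem.Str.count st.1 ps ≠ 0
      then (PySem.Str.replace st.1 ps rs, st.2 + (PySem.Str.count st.1 ps : Int))
      else st)
    = (PySem.Str.replace st.1 ps rs, st.2 + (PySem.Str.count st.1 ps : Int)) := by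
  by_cases h : PySem.Str.count st.1 ps = 0
  · rw [if_neg (fun hcon => hcon h)]
    have hc : pvCnt ps.toList st.1.toList = 0 := by
      have he : PySem.Str.count st.1 ps = pvCnt ps.toList st.1.toList := by
        rw [PySem.Str.count_eq, pvCount_eq _ _ hp]
      rw [← he]
      exact h
    have hrep : PySem.Str.replace st.1 ps rs = st.1 := by
      apply String.toList_inj.mp
      rw [PySem.Str.toList_replace, pvReplace_eq _ _ _ hp, pvRep_of_cnt_zero _ _ _ hc]
    rw [hrep, h]
    simp
  · rw [if_pos h]

theorem pvFoldStep0 (s : String) (ps rs : String) (hp : ps.toList ≠ []) :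
    (if PySem.Str.count s ps ≠ 0
      then (PySem.Str.replace s ps rs, (0 : Int) + (PySem.Str.count s ps : Int))
      else (s, (0 : Int)))
    = (PySem.Str.replace s ps rs, (0 : Int) + (PySem.Str.count s ps : Int)) :=
  pvFoldStep (s, (0 : Int)) ps rs hp

-- ===== VERDICT (by name: the statement is the Claim_ definition above) =====
theorem misc_nl_spec : Claim_equal_misc_nl := by
  intro text _
  unfold Spec_misc_nl
  show misc_nl text = misc_nl_alt text
  simp only [misc_nl, List.foldl_cons, List.foldl_nil]
  rw [pvFoldStep0 _ _ _ (by decide)]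
  rw [pvFoldStep _ _ _ (by decide), pvFoldStep _ _ _ (by decide)]
  simp only []
  simp only [misc_nl_alt]
  rw [pvMain text.toList.length text.toList le_rfl]
  have hp1 : ("NEBOSH safety training Rotterdam Erasmus Bridge - Featured image for NEBOSH in Rotterdam guide" : String).toList = pvB_P1 := rfl
  have hr1 : ("NEBOSH opleiding Rotterdam Erasmusbrug — illustratie bij de Rotterdam-gids" : String).toList = pvB_R1 := rfl
  have hp2 : ("Rotterdam's meest" : String).toList = pvB_P2 := rfl
  have hr2 : ("Rotterdams meest" : String).toList = pvB_R2 := rfl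
  have hp3 : ("Rotterdam's maritieme" : String).toList = pvB_P3 := rfl
  have hr3 : ("Rotterdams maritieme" : String).toList = pvB_R3 := rfl
  have t1 : (PySem.Str.replace text "NEBOSH safety training Rotterdam Erasmus Bridge - Featured image for NEBOSH in Rotterdam guide" "NEBOSH opleiding Rotterdam Erasmusbrug — illustratie bij de Rotterdam-gids").toList = pvRep pvB_P1 pvB_R1 text.toList := by
    rw [PySem.Str.toList_replace, hp1, hr1, pvReplace_eq _ _ _ pvNe1]
  have t2 : (PySem.Str.replace (PySem.Str.replace text "NEBOSH safety training Rotterdam Erasmus Bridge - Featured image for NEBOSH in Rotterdam guide" "NEBOSH opleiding Rotterdam Erasmusbrug — illustratie bij de Rotterdam-gids") "Rotterdam's meest" "Rotterdams meest").toList = pvRep pvB_P2 pvB_R2 (pvRep pvB_P1 pvB_R1 text.toList) := by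
    rw [PySem.Str.toList_replace, hp2, hr2, pvReplace_eq _ _ _ pvNe2, t1]
  have t3 : (PySem.Str.replace (PySem.Str.replace (PySem.Str.replace text "NEBOSH safety training Rotterdam Erasmus Bridge - Featured image for NEBOSH in Rotterdam guide" "NEBOSH opleiding Rotterdam Erasmusbrug — illustratie bij de Rotterdam-gids") "Rotterdam's meest" "Rotterdams meest") "Rotterdam's maritieme" "Rotterdams maritieme").toList = pvRep pvB_P3 pvB_R3 (pvRep pvB_P2 pvB_R2 (pvRep pvB_P1 pvB_R1 text.toList)) := by
    rw [PySem.Str.toList_replace, hp3, hr3, pvReplace_eq _ _ _ pvNe3, t2]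
  have c1 : PySem.Str.count text "NEBOSH safety training Rotterdam Erasmus Bridge - Featured image for NEBOSH in Rotterdam guide" = pvCnt pvB_P1 text.toList := by
    rw [PySem.Str.count_eq, hp1, pvCount_eq _ _ pvNe1]
  have c2 : PySem.Str.count (PySem.Str.replace text "NEBOSH safety training Rotterdam Erasmus Bridge - Featured image for NEBOSH in Rotterdam guide" "NEBOSH opleiding Rotterdam Erasmusbrug — illustratie bij de Rotterdam-gids") "Rotterdam's meest" = pvCnt pvB_P2 (pvRep pvB_P1 pvB_R1 text.toList) := by
    rw [PySem.Str.count_eq, hp2, pvCount_eq _ _ pvNe2, t1]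
  have c3 : PySem.Str.count (PySem.Str.replace (PySem.Str.replace text "NEBOSH safety training Rotterdam Erasmus Bridge - Featured image for NEBOSH in Rotterdam guide" "NEBOSH opleiding Rotterdam Erasmusbrug — illustratie bij de Rotterdam-gids") "Rotterdam's meest" "Rotterdams meest") "Rotterdam's maritieme" = pvCnt pvB_P3 (pvRep pvB_P2 pvB_R2 (pvRep pvB_P1 pvB_R1 text.toList)) := by
    rw [PySem.Str.count_eq, hp3, pvCount_eq _ _ pvNe3, t2]
  simp only [Prod.mk.injEq]
  constructor
  · apply String.toList_inj.mp
    rw [t3, String.toList_ofList]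
  · rw [c1, c2, c3]
    push_cast
    ring
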